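-- pv_equiv track=rewrite | github.com/Rebelronak/DoseSafeAI | ml_models/comprehensive_trainer_fixed.py | _get_drug_category
-- ===== SOURCE A (Python) =====
-- def _get_drug_category(drug_name):
--     """Simple drug categorization based on name patterns"""
--
--     drug_lower = drug_name.lower()
--
--     if any(word in drug_lower for word in ['pril', 'sartan']):
--         return 'cardiovascular'
--     elif any(word in drug_lower for word in ['statin', 'atorv', 'simv']):
--         return 'lipid_lowering'
--     elif any(word in drug_lower for word in ['pam', 'zolam', 'zepam']):
--         return 'psychiatric'
--     elif any(word in drug_lower for word in ['cillin', 'mycin', 'floxacin']):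
--         return 'antibiotic'
--     elif any(word in drug_lower for word in ['ibuprofen', 'aspirin', 'naproxen']):
--         return 'nsaid'
--     elif any(word in drug_lower for word in ['metformin', 'insulin']):
--         return 'antidiabetic'
--     else:
--         return 'other'
-- ===== SOURCE B (Python) =====
-- _PATTERN_PRIORITY = {
--     'pril': 0, 'sartan': 0,
--     'statin': 1, 'atorv': 1, 'simv': 1,
--     'pam': 2, 'zolam': 2, 'zepam': 2,
--     'cillin': 3, 'mycin': 3, 'floxacin': 3,
--     'ibuprofen': 4, 'aspirin': 4, 'naproxen': 4,
--     'metformin': 5, 'insulin': 5,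
-- }
-- _CATEGORIES = ('cardiovascular', 'lipid_lowering', 'psychiatric',
--                'antibiotic', 'nsaid', 'antidiabetic')
--
-- def _get_drug_category(drug_name):
--     name = drug_name.lower()
--     best = min((prio for pat, prio in _PATTERN_PRIORITY.items() if pat in name),
--                default=None)
--     return _CATEGORIES[best] if best is not None else 'other'
-- ===== Notes on version B (the rewrite author's own statement) =====
-- stated objective: alternative
-- what changed: Instead of an early-return cascade of first-match group checks, B makes one full pass collecting the priority index of every matching pattern from a flat pattern-to-priority dict and returns the category of the minimum collected priority (or 'other' if none matched).
import Mathlib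
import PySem

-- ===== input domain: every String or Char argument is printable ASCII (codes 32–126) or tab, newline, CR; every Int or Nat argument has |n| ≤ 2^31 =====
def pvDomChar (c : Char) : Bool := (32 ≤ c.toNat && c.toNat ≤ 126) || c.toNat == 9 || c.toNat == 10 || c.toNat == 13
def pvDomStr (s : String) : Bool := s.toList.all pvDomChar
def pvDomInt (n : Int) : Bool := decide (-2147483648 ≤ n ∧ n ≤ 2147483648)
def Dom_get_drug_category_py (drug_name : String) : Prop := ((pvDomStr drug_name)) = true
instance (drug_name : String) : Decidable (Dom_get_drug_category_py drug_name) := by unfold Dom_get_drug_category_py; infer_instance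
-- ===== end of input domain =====

-- B replaces A's first-match early-return cascade by one full collect-then-minimize pass:
-- it gathers the priority of every matching pattern and returns the category of the minimum priority (alternative; same cost).

-- ===== PORT A =====
def get_drug_category_py (drug_name : String) : String :=
  let drug_lower := PySem.Str.lower drug_name
  if (["pril", "sartan"].any (fun word => PySem.Str.isIn word drug_lower)) then
    "cardiovascular"
  else if (["statin", "atorv", "simv"].any (fun word => PySem.Str.isIn word drug_lower)) then
    "lipid_lowering"
  else if (["pam", "zolam", "zepam"].any (fun word => PySem.Str.isIn word drug_lower)) then
    "psychiatric"
  else if (["cillin", "mycin", "floxacin"].any (fun word => PySem.Str.isIn word drug_lower)) then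
    "antibiotic"
  else if (["ibuprofen", "aspirin", "naproxen"].any (fun word => PySem.Str.isIn word drug_lower)) then
    "nsaid"
  else if (["metformin", "insulin"].any (fun word => PySem.Str.isIn word drug_lower)) then
    "antidiabetic"
  else
    "other"

-- ===== PORT B =====
def pvPatternPriority : List (String × Nat) :=
  [("pril", 0), ("sartan", 0),
   ("statin", 1), ("atorv", 1), ("simv", 1),
   ("pam", 2), ("zolam", 2), ("zepam", 2),
   ("cillin", 3), ("mycin", 3), ("floxacin", 3),
   ("ibuprofen", 4), ("aspirin", 4), ("naproxen", 4),
   ("metformin", 5), ("insulin", 5)]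

def pvCategories : List String :=
  ["cardiovascular", "lipid_lowering", "psychiatric", "antibiotic", "nsaid", "antidiabetic"]

def get_drug_category_py_alt (drug_name : String) : String :=
  let name := PySem.Str.lower drug_name
  -- min((prio for pat, prio in _PATTERN_PRIORITY.items() if pat in name), default=None)
  let best := PySem.List.min?
      (pvPatternPriority.filterMap (fun pi => if PySem.Str.isIn pi.1 name then some pi.2 else none))
      (fun x => x)
  -- _CATEGORIES[best] if best is not None else 'other'
  match best with
  | some b =>
      match PySem.List.pyGet? pvCategories (Int.ofNat b) with
      | some c => c
      | none => "other"   -- unreachable: b < 6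
  | none => "other"

-- ===== PRECONDITION & SPEC =====
def Spec_get_drug_category_py (drug_name : String) (out : String) : Prop := out = get_drug_category_py_alt drug_name
instance (drug_name : String) (out : String) : Decidable (Spec_get_drug_category_py drug_name out) := by unfold Spec_get_drug_category_py; infer_instance

-- ===== CLAIM =====
def Claim_equal_get_drug_category_py : Prop := ∀ (drug_name : String), Dom_get_drug_category_py drug_name → Spec_get_drug_category_py drug_name (get_drug_category_py drug_name)

-- ===== LEMMAS AND PROOFS =====

-- the whole equivalence, abstracted over the 16 substring-test booleans
set_option maxHeartbeats 4000000 in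
theorem pv_key : ∀ (c1 c2 c3 c4 c5 c6 c7 c8 c9 c10 c11 c12 c13 c14 c15 c16 : Bool),
    (if (c1 || c2) then "cardiovascular"
     else if (c3 || (c4 || c5)) then "lipid_lowering"
     else if (c6 || (c7 || c8)) then "psychiatric"
     else if (c9 || (c10 || c11)) then "antibiotic"
     else if (c12 || (c13 || c14)) then "nsaid"
     else if (c15 || c16) then "antidiabetic"
     else "other")
    =
    (match PySem.List.min?
        (List.filterMap (fun (pi : Bool × Nat) => if pi.1 then some pi.2 else none)
          [(c1, 0), (c2, 0), (c3, 1), (c4, 1), (c5, 1), (c6, 2), (c7, 2), (c8, 2),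
           (c9, 3), (c10, 3), (c11, 3), (c12, 4), (c13, 4), (c14, 4), (c15, 5), (c16, 5)])
        (fun x => x) with
     | some b =>
        match PySem.List.pyGet? pvCategories (Int.ofNat b) with
        | some c => c
        | none => "other"
     | none => "other") := by decide

-- ===== VERDICT =====
theorem get_drug_category_py_spec : Claim_equal_get_drug_category_py := by
  intro s _
  unfold Spec_get_drug_category_py get_drug_category_py get_drug_category_py_alt pvPatternPriority
  simp only [List.any_cons, List.any_nil, Bool.or_false]
  rw [show (fun pi : String × Nat => if PySem.Str.isIn pi.1 (PySem.Str.lower s) then some pi.2 else none)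
        = (fun pi : Bool × Nat => if pi.1 then some pi.2 else none) ∘
          (fun pi : String × Nat => (PySem.Str.isIn pi.1 (PySem.Str.lower s), pi.2)) from rfl,
      ← List.filterMap_map]
  simp only [List.map_cons, List.map_nil]
  exact pv_key _ _ _ _ _ _ _ _ _ _ _ _ _ _ _ _
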